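-- pv_equiv track=rewrite | github.com/ht-l1/coding-practice | codewars/7 kyu/alternate-square-sum.py | alternate_sq_sum
-- ===== SOURCE A (Python) =====
-- def alternate_sq_sum(arr):
--     if not arr:
--         return 0
--
--     total_sum = 0
--
--     for i in range(len(arr)):
--         if i % 2 == 0:
--             total_sum += arr[i]
--         else:
--             total_sum += arr[i] ** 2
--
--     return total_sum
-- ===== SOURCE B (Python) =====
-- def alternate_sq_sum(arr):
--     return sum(arr[::2]) + sum(x * x for x in arr[1::2])
-- ===== Notes on version B (the rewrite author's own statement) =====
-- stated objective: simpler
-- what changed: Replaces the indexed loop with its parity branch by two stride-2 slice passes (sum of the even-index slice plus sum of squares of the odd-index slice); the empty-list guard disappears.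
import Mathlib
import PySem

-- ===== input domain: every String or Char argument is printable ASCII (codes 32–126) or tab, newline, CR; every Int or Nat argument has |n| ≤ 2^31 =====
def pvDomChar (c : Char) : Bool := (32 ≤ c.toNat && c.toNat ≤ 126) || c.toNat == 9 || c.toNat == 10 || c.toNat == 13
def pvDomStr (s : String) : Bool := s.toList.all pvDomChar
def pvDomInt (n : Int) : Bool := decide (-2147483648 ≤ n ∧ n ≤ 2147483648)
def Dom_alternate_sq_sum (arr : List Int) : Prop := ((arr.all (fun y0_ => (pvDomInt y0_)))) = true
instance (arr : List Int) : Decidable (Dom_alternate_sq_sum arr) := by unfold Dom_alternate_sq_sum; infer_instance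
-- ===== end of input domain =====

-- B replaces A's indexed loop with parity branch by two stride-2 slice passes (sum of even-index
-- elements plus sum of squares of odd-index elements); proved equal to A on all inputs.

-- ===== PORT A =====
def alternate_sq_sum (arr : List Int) : Int :=
  if arr = [] then 0
  else
    (PySem.List.pyRange 0 arr.length 1).foldl
      (fun total_sum i =>
        if PySem.Int.mod i 2 = 0 then total_sum + PySem.List.pyGetD arr i 0
        else total_sum + (PySem.List.pyGetD arr i 0) ^ 2)
      0

-- ===== PORT B =====
-- hand port of the stride-2 slice xs[::2] (every second element starting at index 0); exact
def pvEvery2 : List Int → List Int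
  | [] => []
  | [x] => [x]
  | x :: _ :: xs => x :: pvEvery2 xs

-- arr[1::2] = every second element of arr.tail
def alternate_sq_sum_alt (arr : List Int) : Int :=
  (pvEvery2 arr).sum + ((pvEvery2 arr.tail).map (fun x => x * x)).sum

-- ===== PRECONDITION & SPEC =====
def Spec_alternate_sq_sum (arr : List Int) (out : Int) : Prop := out = alternate_sq_sum_alt arr
instance (arr : List Int) (out : Int) : Decidable (Spec_alternate_sq_sum arr out) := by unfold Spec_alternate_sq_sum; infer_instance

-- ===== CLAIM (what is proved, stated in full; the proofs are below) =====
def Claim_equal_alternate_sq_sum : Prop := ∀ (arr : List Int), Dom_alternate_sq_sum arr → Spec_alternate_sq_sum arr (alternate_sq_sum arr)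

-- ===== LEMMAS AND PROOFS =====

-- A's loop, re-expressed as a sum over Nat indices
def pvG (arr : List Int) : Int :=
  ((List.range arr.length).map
    (fun k => if k % 2 = 0 then arr.getD k 0 else (arr.getD k 0) ^ 2)).sum

theorem A_eq_G (arr : List Int) : alternate_sq_sum arr = pvG arr := by
  unfold alternate_sq_sum pvG
  rcases arr with _ | ⟨x, xs⟩
  · simp
  · rw [if_neg (by simp)]
    rw [PySem.List.pyRange_one, List.foldl_map]
    simp only [Int.sub_zero, Int.toNat_natCast, zero_add]
    rw [PySem.List.foldl_congr_mem
        (l := List.range (x :: xs).length)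
        (g := fun acc k => acc +
          if k % 2 = 0 then (x :: xs).getD k 0 else ((x :: xs).getD k 0) ^ 2)
        (h := by
          intro acc k hk
          show _ = acc + if k % 2 = 0 then (x :: xs).getD k 0 else ((x :: xs).getD k 0) ^ 2
          rw [PySem.Int.mod_eq_emod_of_pos (by omega), PySem.List.pyGetD_natCast]
          by_cases h : k % 2 = 0
          · rw [if_pos (show ((k : Int)) % 2 = 0 by omega), if_pos h]
          · rw [if_neg (show ¬ ((k : Int)) % 2 = 0 by omega), if_neg h])]
    rw [PySem.List.foldl_add]
    simp

theorem G_eq_alt : ∀ (arr : List Int), pvG arr = alternate_sq_sum_alt arr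
  | [] => by simp [pvG, alternate_sq_sum_alt, pvEvery2]
  | [x] => by simp [pvG, alternate_sq_sum_alt, pvEvery2]
  | x :: y :: r => by
    have ih := G_eq_alt r
    have hrange : List.range (r.length + 2) = List.range 2 ++ (List.range r.length).map (2 + ·) := by
      rw [Nat.add_comm]; exact List.range_add
    unfold pvG alternate_sq_sum_alt
    simp only [List.length_cons, List.tail_cons]
    rw [show r.length + 1 + 1 = r.length + 2 from rfl, hrange]
    unfold pvG alternate_sq_sum_alt at ih
    simp only [List.tail] at ih ⊢
    rw [List.map_append, List.sum_append, List.map_map]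
    have hcongr :
        (List.range r.length).map
          ((fun k => if k % 2 = 0 then (x :: y :: r).getD k 0 else ((x :: y :: r).getD k 0) ^ 2)
            ∘ (2 + ·))
        = (List.range r.length).map
            (fun k => if k % 2 = 0 then r.getD k 0 else (r.getD k 0) ^ 2) := by
      apply List.map_congr_left
      intro k _
      simp only [Function.comp]
      have h1 : (2 + k) % 2 = k % 2 := by omega
      have h2 : (x :: y :: r).getD (2 + k) 0 = r.getD k 0 := by
        simp [show 2 + k = k + 2 from by omega, List.getD]
      rw [h1, h2]
    rw [hcongr, ih]
    rcases r with _ | ⟨a, as⟩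
    · simp [List.range_succ, pvEvery2]
      ring
    · simp only [pvEvery2, List.map_cons, List.sum_cons]
      simp [List.range_succ]
      ring

-- ===== VERDICT (by name: the statement is the Claim_ definition above) =====
theorem alternate_sq_sum_spec : Claim_equal_alternate_sq_sum := by
  intro arr _
  unfold Spec_alternate_sq_sum
  rw [A_eq_G, G_eq_alt]
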